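-- pv_equiv track=rewrite | github.com/corgilee/Implementation | mianjin/Robinhood/house_and_street.py | reconcile_trades
-- ===== SOURCE A (Python) =====
-- from collections import Counter
-- from collections import Counter, defaultdict
-- from collections import Counter, defaultdict
--
-- def reconcile_trades(house_trades, street_trades):
--     # Count occurrences of each trade string
--     house_cnt = Counter(house_trades)
--     street_cnt = Counter(street_trades)
--
--     # Cancel out exact matches
--     for trade in house_cnt.keys() & street_cnt.keys():
--         matched = min(house_cnt[trade], street_cnt[trade])
--         if matched > 0:
--             house_cnt[trade] -= matched
--             street_cnt[trade] -= matched
--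
--     # Collect remaining trades
--     remaining = []
--
--     for trade, count in house_cnt.items():
--         remaining.extend([trade] * count)
--
--     for trade, count in street_cnt.items():
--         remaining.extend([trade] * count)
--
--     # Sort alphabetically
--     remaining.sort()
--     return remaining
-- ===== SOURCE B (Python) =====
-- def reconcile_trades(house_trades, street_trades):
--     # Sort both sides, then merge with two indices; an equal pair of heads
--     # cancels one trade from each side; the rest are emitted in sorted order.
--     hs = sorted(house_trades)
--     ss = sorted(street_trades)
--     i = j = 0
--     out = []
--     while i < len(hs) and j < len(ss):
--         if hs[i] == ss[j]:
--             i += 1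
--             j += 1
--         elif hs[i] < ss[j]:
--             out.append(hs[i])
--             i += 1
--         else:
--             out.append(ss[j])
--             j += 1
--     out.extend(hs[i:])
--     out.extend(ss[j:])
--     return out
-- ===== Notes on version B (the rewrite author's own statement) =====
-- stated objective: alternative
-- what changed: Replaced the Counter/hash cancellation plus final sort by sorting both lists once and merging them with two indices, cancelling equal heads pairwise, so the sorted symmetric multiset difference is produced directly by a linear merge.
import Mathlib
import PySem

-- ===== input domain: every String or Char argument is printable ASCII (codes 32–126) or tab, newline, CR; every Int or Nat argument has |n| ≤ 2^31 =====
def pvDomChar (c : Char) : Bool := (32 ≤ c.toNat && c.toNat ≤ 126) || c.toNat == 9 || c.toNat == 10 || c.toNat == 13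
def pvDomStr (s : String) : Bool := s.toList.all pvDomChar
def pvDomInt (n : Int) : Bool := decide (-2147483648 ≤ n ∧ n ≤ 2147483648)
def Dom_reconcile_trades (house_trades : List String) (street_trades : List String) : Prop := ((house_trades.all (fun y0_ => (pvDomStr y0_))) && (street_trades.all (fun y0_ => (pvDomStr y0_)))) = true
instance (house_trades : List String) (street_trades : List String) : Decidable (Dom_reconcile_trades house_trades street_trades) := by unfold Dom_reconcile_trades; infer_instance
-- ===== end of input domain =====

-- B replaces the Counter/hash cancellation + final sort by a sort of each side and a
-- two-pointer merge that cancels equal heads pairwise (objective: alternative algorithm).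

-- ===== PORT A =====
-- one cancellation step of the 'for trade in house_cnt.keys() & street_cnt.keys()' loop
def pvCancelStep (p : PySem.Dict String Int × PySem.Dict String Int) (t : String) :
    PySem.Dict String Int × PySem.Dict String Int :=
  let matched := min (p.1.getD t 0) (p.2.getD t 0)
  if matched > 0 then
    (p.1.insert t (p.1.getD t 0 - matched), p.2.insert t (p.2.getD t 0 - matched))
  else p

def reconcile_trades (house_trades : List String) (street_trades : List String) : List String :=
  let house_cnt := PySem.Dict.counter house_trades
  let street_cnt := PySem.Dict.counter street_trades
  -- Python iterates the SET house_cnt.keys() & street_cnt.keys() in unspecified hash order;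
  -- we iterate it in house-key order — each key is updated independently and the result is
  -- sorted at the end, so the iteration order does not affect the returned value.
  let inter := PySem.Set.inter (PySem.Set.ofList house_cnt.keys) (PySem.Set.ofList street_cnt.keys)
  let p := inter.foldl pvCancelStep (house_cnt, street_cnt)
  -- remaining.extend([trade] * count): count is never negative here; toNat is exact
  let remaining := p.1.items.foldl (fun acc kc => acc ++ List.replicate kc.2.toNat kc.1) []
  let remaining := p.2.items.foldl (fun acc kc => acc ++ List.replicate kc.2.toNat kc.1) remaining
  PySem.List.sorted remaining (fun x => x) false

-- ===== PORT B =====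
-- the while-loop of Source B as the obvious structural recursion over the two sorted lists
def pvMerge : List String → List String → List String
  | [], ys => ys
  | x :: xs, [] => x :: xs
  | x :: xs, y :: ys =>
    if x = y then pvMerge xs ys
    else if x < y then x :: pvMerge xs (y :: ys)
    else y :: pvMerge (x :: xs) ys
termination_by xs ys => xs.length + ys.length

def reconcile_trades_alt (house_trades : List String) (street_trades : List String) : List String :=
  pvMerge (PySem.List.sorted house_trades (fun x => x) false)
          (PySem.List.sorted street_trades (fun x => x) false)

-- ===== PRECONDITION & SPEC =====
def Spec_reconcile_trades (house_trades : List String) (street_trades : List String) (out : List String) : Prop := out = reconcile_trades_alt house_trades street_trades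
instance (house_trades : List String) (street_trades : List String) (out : List String) : Decidable (Spec_reconcile_trades house_trades street_trades out) := by unfold Spec_reconcile_trades; infer_instance

-- ===== CLAIM (what is proved, stated in full; the proofs are below) =====
def Claim_equal_reconcile_trades : Prop := ∀ (house_trades : List String) (street_trades : List String), Dom_reconcile_trades house_trades street_trades → Spec_reconcile_trades house_trades street_trades (reconcile_trades house_trades street_trades)

-- ===== LEMMAS AND PROOFS =====

-- every element of a merge comes from one of the two lists
theorem mem_pvMerge (xs ys : List String) (t : String) (h : t ∈ pvMerge xs ys) :
    t ∈ xs ∨ t ∈ ys := by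
  fun_induction pvMerge xs ys with
  | case1 ys => exact Or.inr h
  | case2 x xs => exact Or.inl h
  | case3 xs y ys ih =>
    rcases ih h with h1 | h1
    · exact Or.inl (List.mem_cons_of_mem _ h1)
    · exact Or.inr (List.mem_cons_of_mem _ h1)
  | case4 x xs y ys heq hlt ih =>
    rcases List.mem_cons.mp h with rfl | h1
    · exact Or.inl List.mem_cons_self
    · rcases ih h1 with h2 | h2
      · exact Or.inl (List.mem_cons_of_mem _ h2)
      · exact Or.inr h2
  | case5 x xs y ys heq hlt ih =>
    rcases List.mem_cons.mp h with rfl | h1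
    · exact Or.inr List.mem_cons_self
    · rcases ih h1 with h2 | h2
      · exact Or.inl h2
      · exact Or.inr (List.mem_cons_of_mem _ h2)

-- the merge of two ≤-sorted lists is ≤-sorted
theorem pairwise_pvMerge (xs ys : List String)
    (hx : xs.Pairwise (· ≤ ·)) (hy : ys.Pairwise (· ≤ ·)) :
    (pvMerge xs ys).Pairwise (· ≤ ·) := by
  fun_induction pvMerge xs ys with
  | case1 ys => exact hy
  | case2 x xs => exact hx
  | case3 xs y ys ih =>
    exact ih (List.Pairwise.of_cons hx) (List.Pairwise.of_cons hy)
  | case4 x xs y ys heq hlt ih =>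
    refine List.pairwise_cons.mpr ⟨?_, ih (List.Pairwise.of_cons hx) hy⟩
    intro b hb
    rcases mem_pvMerge _ _ _ hb with h1 | h1
    · exact (List.pairwise_cons.mp hx).1 b h1
    · rcases List.mem_cons.mp h1 with rfl | h2
      · exact le_of_lt hlt
      · exact le_trans (le_of_lt hlt) ((List.pairwise_cons.mp hy).1 b h2)
  | case5 x xs y ys heq hlt ih =>
    have hyx : y ≤ x := le_of_not_gt hlt
    refine List.pairwise_cons.mpr ⟨?_, ih hx (List.Pairwise.of_cons hy)⟩
    intro b hb
    rcases mem_pvMerge _ _ _ hb with h1 | h1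
    · rcases List.mem_cons.mp h1 with rfl | h2
      · exact hyx
      · exact le_trans hyx ((List.pairwise_cons.mp hx).1 b h2)
    · exact (List.pairwise_cons.mp hy).1 b h1

-- count of each element in the merge of two sorted lists: the symmetric multiset difference
theorem count_pvMerge (xs ys : List String)
    (hx : xs.Pairwise (· ≤ ·)) (hy : ys.Pairwise (· ≤ ·)) (t : String) :
    (pvMerge xs ys).count t = (xs.count t - ys.count t) + (ys.count t - xs.count t) := by
  fun_induction pvMerge xs ys with
  | case1 ys => simp
  | case2 x xs => simp
  | case3 xs y ys ih =>
    have hrec := ih (List.Pairwise.of_cons hx) (List.Pairwise.of_cons hy)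
    simp only [List.count_cons, beq_iff_eq] at hrec ⊢
    by_cases h1 : y = t <;> simp only [h1, if_true, if_false] <;> omega
  | case4 x xs y ys heq hlt ih =>
    have hrec := ih (List.Pairwise.of_cons hx) hy
    by_cases h1 : x = t
    · subst h1
      -- x < y and y :: ys is sorted, so x does not occur in y :: ys
      have hzero : (y :: ys).count x = 0 := by
        rw [List.count_eq_zero]
        intro hmem
        rcases List.mem_cons.mp hmem with rfl | h2
        · exact absurd hlt (lt_irrefl _)
        · exact absurd (lt_of_lt_of_le hlt ((List.pairwise_cons.mp hy).1 x h2)) (lt_irrefl _)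
      simp only [List.count_cons_self, hzero] at hrec ⊢
      omega
    · simp only [List.count_cons, beq_iff_eq, h1, if_false, add_zero] at hrec ⊢
      exact hrec
  | case5 x xs y ys heq hlt ih =>
    have hrec := ih hx (List.Pairwise.of_cons hy)
    by_cases h1 : y = t
    · subst h1
      have hyx : y < x := lt_of_le_of_ne (le_of_not_gt hlt) (fun h => heq h.symm)
      -- y < x and x :: xs is sorted, so y does not occur in x :: xs
      have hzero : (x :: xs).count y = 0 := by
        rw [List.count_eq_zero]
        intro hmem
        rcases List.mem_cons.mp hmem with rfl | h2
        · exact absurd hyx (lt_irrefl _)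
        · exact absurd (lt_of_lt_of_le hyx ((List.pairwise_cons.mp hx).1 y h2)) (lt_irrefl _)
      simp only [List.count_cons_self, hzero] at hrec ⊢
      omega
    · simp only [List.count_cons, beq_iff_eq, h1, if_false, add_zero] at hrec ⊢
      exact hrec

-- effect of one cancellation step on the two key lists
theorem pvCancelStep_keys (p : PySem.Dict String Int × PySem.Dict String Int) (a : String)
    (h1 : p.1.contains a = true) (h2 : p.2.contains a = true) :
    (pvCancelStep p a).1.keys = p.1.keys ∧ (pvCancelStep p a).2.keys = p.2.keys := by
  simp only [pvCancelStep]
  split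
  · exact ⟨PySem.Dict.keys_insert_of_contains _ _ h1, PySem.Dict.keys_insert_of_contains _ _ h2⟩
  · exact ⟨rfl, rfl⟩

-- one cancellation step leaves every other key's count alone
theorem pvCancelStep_getD_ne (p : PySem.Dict String Int × PySem.Dict String Int) (a w : String)
    (hw : w ≠ a) :
    (pvCancelStep p a).1.getD w 0 = p.1.getD w 0 ∧ (pvCancelStep p a).2.getD w 0 = p.2.getD w 0 := by
  simp only [pvCancelStep]
  split
  · constructor <;> simp [PySem.Dict.getD_insert, hw]
  · exact ⟨rfl, rfl⟩

-- one cancellation step subtracts the matched amount at its own key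
theorem pvCancelStep_getD_self (p : PySem.Dict String Int × PySem.Dict String Int) (a : String)
    (h1 : 0 ≤ p.1.getD a 0) (h2 : 0 ≤ p.2.getD a 0) :
    (pvCancelStep p a).1.getD a 0 = p.1.getD a 0 - min (p.1.getD a 0) (p.2.getD a 0) ∧
    (pvCancelStep p a).2.getD a 0 = p.2.getD a 0 - min (p.1.getD a 0) (p.2.getD a 0) := by
  simp only [pvCancelStep]
  split
  · constructor <;> simp
  · rename_i hnot
    simp only [not_lt] at hnot
    constructor <;> omega

-- the cancellation fold keeps both key lists unchanged
theorem pvCancel_keys (l : List String) (p : PySem.Dict String Int × PySem.Dict String Int)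
    (h : ∀ t ∈ l, p.1.contains t = true ∧ p.2.contains t = true) :
    (l.foldl pvCancelStep p).1.keys = p.1.keys ∧ (l.foldl pvCancelStep p).2.keys = p.2.keys := by
  induction l generalizing p with
  | nil => exact ⟨rfl, rfl⟩
  | cons a l ih =>
    have ha := h a List.mem_cons_self
    have hk := pvCancelStep_keys p a ha.1 ha.2
    rw [List.foldl_cons]
    have hrest : ∀ t ∈ l, (pvCancelStep p a).1.contains t = true ∧
        (pvCancelStep p a).2.contains t = true := by
      intro t ht
      constructor
      · rw [PySem.Dict.contains_iff_mem_keys, hk.1, ← PySem.Dict.contains_iff_mem_keys]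
        exact (h t (List.mem_cons_of_mem _ ht)).1
      · rw [PySem.Dict.contains_iff_mem_keys, hk.2, ← PySem.Dict.contains_iff_mem_keys]
        exact (h t (List.mem_cons_of_mem _ ht)).2
    have := ih (pvCancelStep p a) hrest
    exact ⟨this.1.trans hk.1, this.2.trans hk.2⟩

-- per-key effect of the cancellation fold (counts are nonnegative going in)
theorem pvCancel_getD (l : List String) (p : PySem.Dict String Int × PySem.Dict String Int)
    (v : String) (hnd : l.Nodup) (h1 : 0 ≤ p.1.getD v 0) (h2 : 0 ≤ p.2.getD v 0) :
    (l.foldl pvCancelStep p).1.getD v 0 =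
      (if v ∈ l then p.1.getD v 0 - min (p.1.getD v 0) (p.2.getD v 0) else p.1.getD v 0) ∧
    (l.foldl pvCancelStep p).2.getD v 0 =
      (if v ∈ l then p.2.getD v 0 - min (p.1.getD v 0) (p.2.getD v 0) else p.2.getD v 0) := by
  induction l generalizing p with
  | nil => simp
  | cons a l ih =>
    rw [List.foldl_cons]
    rcases List.nodup_cons.mp hnd with ⟨hal, hndl⟩
    by_cases hva : v = a
    · subst hva
      have hs := pvCancelStep_getD_self p v h1 h2
      have hvl : v ∉ l := hal
      have := ih (pvCancelStep p v) hndl (by rw [hs.1]; omega) (by rw [hs.2]; omega)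
      simp only [if_neg hvl] at this
      simp only [List.mem_cons, true_or, if_pos]
      exact ⟨this.1.trans hs.1, this.2.trans hs.2⟩
    · have hs := pvCancelStep_getD_ne p a v hva
      have := ih (pvCancelStep p a) hndl (by rw [hs.1]; exact h1) (by rw [hs.2]; exact h2)
      rw [hs.1, hs.2] at this
      simp only [List.mem_cons, hva, false_or]
      exact this

-- count of an element in a flatMap of replicate blocks over a duplicate-free key list
theorem count_flatMap_replicate (l : List String) (f : String → Nat) (v : String)
    (hnd : l.Nodup) :
    (l.flatMap (fun k => List.replicate (f k) k)).count v = if v ∈ l then f v else 0 := by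
  induction l with
  | nil => simp
  | cons a l ih =>
    rw [List.flatMap_cons, List.count_append, ih (List.nodup_cons.mp hnd).2]
    by_cases hva : v = a
    · subst hva
      have hvl : v ∉ l := (List.nodup_cons.mp hnd).1
      simp [hvl]
    · simp [List.count_replicate, hva, Ne.symm hva]

-- ===== VERDICT (by name: the statement is the Claim_ definition above) =====
theorem reconcile_trades_spec : Claim_equal_reconcile_trades := by
  intro h s _
  unfold Spec_reconcile_trades
  show reconcile_trades h s = reconcile_trades_alt h s
  simp only [reconcile_trades, reconcile_trades_alt]
  -- abbreviations for A's intermediate state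
  set hc := PySem.Dict.counter h with hhc
  set sc := PySem.Dict.counter s with hsc
  set inter := PySem.Set.inter (PySem.Set.ofList hc.keys) (PySem.Set.ofList sc.keys) with hinter
  set q := inter.foldl pvCancelStep (hc, sc) with hq
  have hkeys1 : hc.keys = PySem.Set.ofList h := PySem.Dict.keys_counter h
  have hkeys2 : sc.keys = PySem.Set.ofList s := PySem.Dict.keys_counter s
  have hnd1 : hc.keys.Nodup := PySem.Dict.nodup_keys_counter h
  have hnd2 : sc.keys.Nodup := PySem.Dict.nodup_keys_counter s
  have hofl1 : PySem.Set.ofList hc.keys = hc.keys := PySem.Set.ofList_eq_self_of_nodup _ hnd1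
  have hofl2 : PySem.Set.ofList sc.keys = sc.keys := PySem.Set.ofList_eq_self_of_nodup _ hnd2
  have hmem_inter : ∀ v, v ∈ inter ↔ v ∈ h ∧ v ∈ s := by
    intro v
    rw [hinter, PySem.Set.mem_inter, hofl1, hofl2, hkeys1, hkeys2,
       PySem.Set.mem_ofList, PySem.Set.mem_ofList]
  have hnd_inter : inter.Nodup := by
    rw [hinter, hofl1]
    exact PySem.Set.nodup_inter _ _ hnd1
  -- the cancellation loop never changes the key lists
  have hqkeys := pvCancel_keys inter (hc, sc) (by
    intro t ht
    rcases (hmem_inter t).mp ht with ⟨th, ts⟩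
    constructor
    · rw [PySem.Dict.contains_iff_mem_keys, hkeys1, PySem.Set.mem_ofList]; exact th
    · rw [PySem.Dict.contains_iff_mem_keys, hkeys2, PySem.Set.mem_ofList]; exact ts)
  rw [← hq] at hqkeys
  -- the per-key counts after the loop
  have hcount1 : ∀ v, hc.getD v 0 = (h.count v : Int) := by
    intro v; rw [hhc, PySem.Dict.getD_counter]
  have hcount2 : ∀ v, sc.getD v 0 = (s.count v : Int) := by
    intro v; rw [hsc, PySem.Dict.getD_counter]
  have hgetD := fun v => pvCancel_getD inter (hc, sc) v hnd_inter
    (by rw [hcount1]; exact Int.natCast_nonneg _)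
    (by rw [hcount2]; exact Int.natCast_nonneg _)
  simp only [← hq] at hgetD
  simp only [hcount1, hcount2] at hgetD
  -- A's 'remaining' list, as an explicit flatMap
  rw [PySem.List.foldl_append_eq_flatMap, PySem.List.foldl_append_eq_flatMap, List.nil_append]
  rw [PySem.Dict.items_eq_map_keys q.1 (by rw [hqkeys.1]; exact hnd1) 0,
      PySem.Dict.items_eq_map_keys q.2 (by rw [hqkeys.2]; exact hnd2) 0]
  rw [List.flatMap_map, List.flatMap_map]
  -- both sides are ≤-sorted lists with the same multiset of elements
  apply PySem.List.sorted_id_eq_of_perm_of_pairwise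
  · apply List.perm_iff_count.mpr
    intro v
    rw [List.count_append,
        count_flatMap_replicate _ _ _ (by rw [hqkeys.1]; exact hnd1),
        count_flatMap_replicate _ _ _ (by rw [hqkeys.2]; exact hnd2)]
    rw [count_pvMerge _ _ (PySem.List.sorted_pairwise h (fun x => x))
        (PySem.List.sorted_pairwise s (fun x => x)) v]
    rw [List.Perm.count_eq (PySem.List.sorted_perm h (fun x => x) false) v,
        List.Perm.count_eq (PySem.List.sorted_perm s (fun x => x) false) v]
    simp only [hqkeys.1, hqkeys.2, hkeys1, hkeys2, PySem.Set.mem_ofList]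
    rcases hgetD v with ⟨hg1, hg2⟩
    simp only [hg1, hg2, hmem_inter v]
    by_cases hvh : v ∈ h <;> by_cases hvs : v ∈ s
    · simp only [hvh, hvs, and_self, if_true]
      omega
    · have s0 : s.count v = 0 := List.count_eq_zero.mpr hvs
      simp only [hvh, hvs, and_false, if_true, if_false, s0]
      omega
    · have h0 : h.count v = 0 := List.count_eq_zero.mpr hvh
      simp only [hvh, hvs, false_and, if_true, if_false, h0]
      omega
    · have h0 : h.count v = 0 := List.count_eq_zero.mpr hvh
      have s0 : s.count v = 0 := List.count_eq_zero.mpr hvs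
      simp only [hvh, hvs, false_and, if_false, h0, s0]
  · exact pairwise_pvMerge _ _ (PySem.List.sorted_pairwise h (fun x => x))
      (PySem.List.sorted_pairwise s (fun x => x))
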